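-- pv_equiv track=rewrite | github.com/ImMeAndYouAreYou/Magic_Studios | sales_bot/db.py | _translate_query
-- ===== SOURCE A (Python) =====
-- def _translate_query(query: str) -> str:
--     translated = query.replace(" COLLATE NOCASE", "")
--     parts = translated.split("?")
--     if len(parts) == 1:
--         return translated
--
--     rebuilt: list[str] = [parts[0]]
--     for index, part in enumerate(parts[1:], start=1):
--         rebuilt.append(f"${index}")
--         rebuilt.append(part)
--     return "".join(rebuilt)
-- ===== SOURCE B (Python) =====
-- def _translate_query(query: str) -> str:
--     translated = query.replace(" COLLATE NOCASE", "")
--     for index in range(1, translated.count("?") + 1):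
--         translated = translated.replace("?", f"${index}", 1)
--     return translated
-- ===== Notes on version B (the rewrite author's own statement) =====
-- stated objective: alternative
-- what changed: Instead of splitting on '?' and interleaving numbered markers in a single join, B first counts the placeholders and then performs that many staged str.replace(old,new,1) passes, each pass rewriting only the leftmost remaining '?' to $k (correct because '$k' introduces no new '?').
import Mathlib
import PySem

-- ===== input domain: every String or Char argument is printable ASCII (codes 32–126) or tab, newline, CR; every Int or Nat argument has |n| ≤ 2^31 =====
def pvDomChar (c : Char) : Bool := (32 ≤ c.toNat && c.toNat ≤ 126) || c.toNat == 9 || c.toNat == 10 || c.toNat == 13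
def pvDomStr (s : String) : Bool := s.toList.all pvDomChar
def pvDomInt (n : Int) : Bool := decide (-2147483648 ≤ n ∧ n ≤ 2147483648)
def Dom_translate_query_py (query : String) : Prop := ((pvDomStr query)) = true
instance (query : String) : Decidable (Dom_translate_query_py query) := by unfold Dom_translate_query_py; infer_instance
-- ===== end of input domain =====

-- B replaces A's split/enumerate/interleave/join pipeline with staged passes: it counts the
-- '?' placeholders, then runs that many replace(…, 1) passes, each rewriting only the
-- leftmost remaining '?' to $k; alternative decomposition, same result.

-- ===== PORT A =====
def translate_query_py (query : String) : String :=
  let translated := PySem.Str.replace query " COLLATE NOCASE" ""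
  -- translated.split("?"); the separator "?" is nonempty, so split? is always `some`
  let parts : List String := (PySem.Str.split? translated "?").getD []
  if parts.length = 1 then translated
  else
    let rebuilt : List String :=
      (PySem.List.enumerate (parts.drop 1) 1).foldl
        (fun acc p => acc ++ ["$" ++ PySem.Int.toStr p.1] ++ [p.2])
        [parts.headD ""]
    PySem.Str.join "" rebuilt

-- ===== PORT B =====
-- hand port of s.replace("?", new, 1): replace the FIRST occurrence of the one-char
-- pattern "?" by `new`, leave the rest unchanged; exact for this nonempty pattern and count=1
def pvReplaceFirstQ : List Char → List Char → List Char
  | [], _ => []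
  | c :: rest, new => if c = '?' then new ++ rest else c :: pvReplaceFirstQ rest new

def translate_query_py_alt (query : String) : String :=
  let translated := PySem.Str.replace query " COLLATE NOCASE" ""
  let total := PySem.Str.count translated "?"
  -- for index in range(1, total + 1): translated = translated.replace("?", f"${index}", 1)
  String.ofList
    ((PySem.List.pyRange 1 ((total : Int) + 1) 1).foldl
      (fun s index => pvReplaceFirstQ s ('$' :: PySem.Int.toChars index))
      translated.toList)

-- ===== PRECONDITION & SPEC =====
def Spec_translate_query_py (query : String) (out : String) : Prop := out = translate_query_py_alt query
instance (query : String) (out : String) : Decidable (Spec_translate_query_py query out) := by unfold Spec_translate_query_py; infer_instance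

-- ===== CLAIM (what is proved, stated in full; the proofs are below) =====
def Claim_equal_translate_query_py : Prop := ∀ (query : String), Dom_translate_query_py query → Spec_translate_query_py query (translate_query_py query)

-- ===== LEMMAS AND PROOFS =====

-- Canonical left-to-right numbering: each '?' becomes "$n", n counting up from the start value.
def pvSubQ : List Char → Int → List Char
  | [], _ => []
  | c :: rest, n =>
      if c = '?' then ('$' :: PySem.Int.toChars n) ++ pvSubQ rest (n + 1)
      else c :: pvSubQ rest n

lemma pvSubQ_cons_q (rest : List Char) (n : Int) :
    pvSubQ ('?' :: rest) n = ('$' :: PySem.Int.toChars n) ++ pvSubQ rest (n + 1) := by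
  simp [pvSubQ]

lemma pvSubQ_cons_ne {c : Char} (hc : c ≠ '?') (rest : List Char) (n : Int) :
    pvSubQ (c :: rest) n = c :: pvSubQ rest n := by
  simp [pvSubQ, hc]

-- ---------- A-side: characterise split-on-'?' / interleave / join as pvSubQ ----------

def pvSplitAux : List Char → List Char → List (List Char)
  | [], cur => [cur.reverse]
  | c :: rest, cur =>
      if c = '?' then cur.reverse :: pvSplitAux rest []
      else pvSplitAux rest (c :: cur)

lemma pvSplitAux_cons_q (rest cur : List Char) :
    pvSplitAux ('?' :: rest) cur = cur.reverse :: pvSplitAux rest [] := by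
  simp [pvSplitAux]

lemma pvSplitAux_cons_ne {c : Char} (hc : c ≠ '?') (rest cur : List Char) :
    pvSplitAux (c :: rest) cur = pvSplitAux rest (c :: cur) := by
  simp [pvSplitAux, hc]

lemma pvSplitAux_ne_nil (cs cur : List Char) : pvSplitAux cs cur ≠ [] := by
  induction cs generalizing cur with
  | nil => simp [pvSplitAux]
  | cons c rest ih =>
      simp only [pvSplitAux]
      split_ifs <;> simp [ih]

lemma pv_go_spec (fuel : Nat) :
    ∀ (l cur : List Char) (acc : List (List Char)), l.length ≤ fuel →
      PySem.Chars.splitOn.go ['?'] fuel l cur acc = acc.reverse ++ pvSplitAux l cur := by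
  induction fuel with
  | zero =>
      intro l cur acc h
      have : l = [] := List.eq_nil_of_length_eq_zero (Nat.le_zero.mp h)
      subst this
      simp [PySem.Chars.splitOn.go, pvSplitAux]
  | succ fuel ih =>
      intro l cur acc h
      cases l with
      | nil => simp [PySem.Chars.splitOn.go, pvSplitAux]
      | cons c rest =>
          have hr : rest.length ≤ fuel := by simpa using Nat.lt_succ_iff.mp (by simpa using h)
          by_cases hc : c = '?'
          · have hpre : List.isPrefixOf ['?'] (c :: rest) = true := by
              simp [List.isPrefixOf, hc]
            rw [PySem.Chars.splitOn.go, if_pos hpre]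
            subst hc
            simp only [List.length_cons, List.length_nil, List.drop_succ_cons, List.drop_zero]
            rw [ih rest [] (cur.reverse :: acc) hr, pvSplitAux_cons_q]
            simp
          · have hpre : ¬ (List.isPrefixOf ['?'] (c :: rest) = true) := by
              simp [List.isPrefixOf]
              exact fun h' => absurd h'.symm hc
            rw [PySem.Chars.splitOn.go, if_neg hpre]
            rw [ih rest (c :: cur) acc hr, pvSplitAux_cons_ne hc]

lemma pv_splitOn_eq (cs : List Char) :
    PySem.Chars.splitOn cs ['?'] = pvSplitAux cs [] := by
  unfold PySem.Chars.splitOn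
  exact pv_go_spec (cs.length + 1) cs [] [] (Nat.le_succ _)

-- "$N" markers interleaved: the value A's join computes, structurally.
def pvJoinParts : List (List Char) → Int → List Char
  | [], _ => []
  | [p], _ => p
  | p :: q :: ps, n => p ++ ('$' :: PySem.Int.toChars n) ++ pvJoinParts (q :: ps) (n + 1)

lemma pv_bridge (cs : List Char) :
    ∀ (cur : List Char) (n : Int),
      pvJoinParts (pvSplitAux cs cur) n = cur.reverse ++ pvSubQ cs n := by
  induction cs with
  | nil => intro cur n; simp [pvSplitAux, pvJoinParts, pvSubQ]
  | cons c rest ih =>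
      intro cur n
      by_cases hc : c = '?'
      · subst hc
        obtain ⟨q, ps, hqs⟩ := List.exists_cons_of_ne_nil (pvSplitAux_ne_nil rest [])
        rw [pvSplitAux_cons_q, pvSubQ_cons_q, hqs, pvJoinParts, ← hqs, ih [] (n + 1)]
        simp
      · rw [pvSplitAux_cons_ne hc, pvSubQ_cons_ne hc, ih (c :: cur) n]
        simp

lemma pv_split_singleton (cs : List Char) :
    ∀ (cur q : List Char), pvSplitAux cs cur = [q] → q = cur.reverse ++ cs := by
  induction cs with
  | nil => intro cur q h; simp [pvSplitAux] at h; simp [h]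
  | cons c rest ih =>
      intro cur q h
      by_cases hc : c = '?'
      · subst hc
        rw [pvSplitAux_cons_q] at h
        exact absurd (by simpa using congrArg List.tail h) (by simpa using pvSplitAux_ne_nil rest [])
      · rw [pvSplitAux_cons_ne hc] at h
        have := ih _ _ h
        simpa using this

-- A's foldl over enumerate builds init ++ (marker, part, marker, part, …)
def pvMarks : List String → Int → List String
  | [], _ => []
  | p :: ps, n => ("$" ++ PySem.Int.toStr n) :: p :: pvMarks ps (n + 1)

lemma pv_foldl_enum (ps : List String) :
    ∀ (n : Int) (init : List String),
      (PySem.List.enumerate ps n).foldl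
        (fun acc p => acc ++ ["$" ++ PySem.Int.toStr p.1] ++ [p.2]) init
      = init ++ pvMarks ps n := by
  induction ps with
  | nil => intro n init; simp [PySem.List.enumerate_nil, pvMarks]
  | cons p ps ih =>
      intro n init
      rw [PySem.List.enumerate_cons]
      simp only [List.foldl_cons, pvMarks, ih]
      simp

lemma pv_join_marks (ps : List String) :
    ∀ (n : Int) (p : List Char),
      PySem.Chars.join [] (p :: (pvMarks ps n).map String.toList)
        = pvJoinParts (p :: ps.map String.toList) n := by
  induction ps with
  | nil => intro n p; simp [pvMarks, pvJoinParts, PySem.Chars.join_singleton]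
  | cons q ps ih =>
      intro n p
      simp only [pvMarks, List.map_cons]
      rw [PySem.Chars.join_cons_cons, PySem.Chars.join_cons_cons, ih (n + 1) q.toList]
      simp [pvJoinParts, PySem.Int.toList_toStr]

-- A's port computes pvSubQ of the stripped string, numbered from 1.
lemma pv_A_eq (query : String) :
    translate_query_py query
      = String.ofList (pvSubQ (PySem.Str.replace query " COLLATE NOCASE" "").toList 1) := by
  unfold translate_query_py
  set t := PySem.Str.replace query " COLLATE NOCASE" "" with ht
  have hmap : (PySem.Str.split? t "?").map (List.map String.toList)
      = some (PySem.Chars.splitOn t.toList ['?']) := by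
    rw [PySem.Str.split?_map]
    simp [PySem.Chars.split?]
  obtain ⟨l, hl⟩ : ∃ l, PySem.Str.split? t "?" = some l := by
    cases h : PySem.Str.split? t "?" with
    | none => rw [h] at hmap; simp at hmap
    | some l => exact ⟨l, rfl⟩
  have hlmap : l.map String.toList = pvSplitAux t.toList [] := by
    rw [hl] at hmap
    simpa [pv_splitOn_eq] using hmap
  simp only [hl, Option.getD_some]
  by_cases hlen : l.length = 1
  · obtain ⟨p, hp⟩ : ∃ p, l = [p] := by
      cases l with
      | nil => simp at hlen
      | cons a l' => cases l' with
        | nil => exact ⟨a, rfl⟩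
        | cons b l'' => simp at hlen
    subst hp
    have hp' : p.toList = t.toList := by
      have := pv_split_singleton t.toList [] p.toList (by simpa using hlmap.symm)
      simpa using this
    have hsub : pvSubQ t.toList 1 = t.toList := by
      have hb := pv_bridge t.toList [] 1
      rw [← hlmap] at hb
      simpa [pvJoinParts, hp'] using hb.symm
    simp [hlen, hsub]
  · obtain ⟨p0, p1, rest, hl3⟩ : ∃ p0 p1 rest, l = p0 :: p1 :: rest := by
      cases l with
      | nil =>
          exfalso
          have := pvSplitAux_ne_nil t.toList []
          rw [← hlmap] at this; simp at this
      | cons a l' => cases l' with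
        | nil => simp at hlen
        | cons b l'' => exact ⟨a, b, l'', rfl⟩
    subst hl3
    rw [if_neg hlen]
    simp only [List.drop_succ_cons, List.drop_zero, List.headD_cons]
    rw [pv_foldl_enum]
    apply String.toList_inj.mp
    rw [PySem.Str.toList_join]
    simp only [String.toList_empty]
    have hj := pv_join_marks (p1 :: rest) 1 p0.toList
    simp only [List.map_cons] at hj
    rw [List.singleton_append, List.map_cons, hj]
    have : p0.toList :: p1.toList :: rest.map String.toList = pvSplitAux t.toList [] := by
      simpa using hlmap
    rw [show (p0.toList :: p1.toList :: List.map String.toList rest) = pvSplitAux t.toList [] from this]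
    rw [pv_bridge t.toList [] 1]
    simp

-- ---------- B-side: the staged replace-first loop computes pvSubQ ----------

lemma pv_digitChar_ne_q (m : Nat) : Nat.digitChar m ≠ '?' := by
  intro hq
  by_cases h : m < 16
  · interval_cases m <;> exact absurd hq (by decide)
  · unfold Nat.digitChar at hq
    rw [if_neg (by omega : ¬ m = 0), if_neg (by omega : ¬ m = 1), if_neg (by omega : ¬ m = 2), if_neg (by omega : ¬ m = 3), if_neg (by omega : ¬ m = 4), if_neg (by omega : ¬ m = 5), if_neg (by omega : ¬ m = 6), if_neg (by omega : ¬ m = 7), if_neg (by omega : ¬ m = 8), if_neg (by omega : ¬ m = 9), if_neg (by omega : ¬ m = 10), if_neg (by omega : ¬ m = 11), if_neg (by omega : ¬ m = 12), if_neg (by omega : ¬ m = 13), if_neg (by omega : ¬ m = 14), if_neg (by omega : ¬ m = 15)] at hq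
    exact absurd hq (by decide)

lemma pv_mem_toDigitsCore (fuel : Nat) :
    ∀ (n : Nat) (acc : List Char) (c : Char), c ∈ Nat.toDigitsCore 10 fuel n acc →
      c ∈ acc ∨ ∃ m, c = Nat.digitChar m := by
  induction fuel with
  | zero => intro n acc c h; exact Or.inl (by simpa [Nat.toDigitsCore] using h)
  | succ fuel ih =>
      intro n acc c h
      rw [Nat.toDigitsCore] at h
      by_cases hz : n / 10 = 0
      · rw [if_pos hz] at h
        rcases List.mem_cons.mp h with h | h
        · exact Or.inr ⟨n % 10, h⟩
        · exact Or.inl h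
      · rw [if_neg hz] at h
        rcases ih _ _ _ h with h | h
        · rcases List.mem_cons.mp h with h | h
          · exact Or.inr ⟨n % 10, h⟩
          · exact Or.inl h
        · exact Or.inr h

lemma pv_q_not_mem_toChars (n : Int) : '?' ∉ PySem.Int.toChars n := by
  unfold PySem.Int.toChars
  split_ifs with h
  · intro hmem
    rcases List.mem_cons.mp hmem with h' | h'
    · exact absurd h' (by decide)
    · rcases pv_mem_toDigitsCore _ _ _ _ h' with h'' | ⟨m, h''⟩
      · simp at h''
      · exact pv_digitChar_ne_q m h''.symm
  · intro hmem
    rcases pv_mem_toDigitsCore _ _ _ _ hmem with h'' | ⟨m, h''⟩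
    · simp at h''
    · exact pv_digitChar_ne_q m h''.symm

lemma pv_count_go_eq (fuel : Nat) :
    ∀ (l : List Char) (acc : Nat), l.length ≤ fuel →
      PySem.Chars.count.go ['?'] fuel l acc = acc + l.count '?' := by
  induction fuel with
  | zero =>
      intro l acc h
      have : l = [] := List.eq_nil_of_length_eq_zero (Nat.le_zero.mp h)
      subst this
      simp [PySem.Chars.count.go]
  | succ fuel ih =>
      intro l acc h
      cases l with
      | nil => simp [PySem.Chars.count.go]
      | cons c rest =>
          have hr : rest.length ≤ fuel := by simpa using Nat.lt_succ_iff.mp (by simpa using h)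
          by_cases hc : c = '?'
          · have hpre : List.isPrefixOf ['?'] (c :: rest) = true := by
              simp [List.isPrefixOf, hc]
            rw [PySem.Chars.count.go, if_pos hpre]
            subst hc
            simp only [List.length_cons, List.length_nil, List.drop_succ_cons, List.drop_zero]
            rw [ih rest (acc + 1) hr]
            simp
            omega
          · have hpre : ¬ (List.isPrefixOf ['?'] (c :: rest) = true) := by
              simp [List.isPrefixOf]
              exact fun h' => absurd h'.symm hc
            rw [PySem.Chars.count.go, if_neg hpre, ih rest acc hr]
            simp [hc]

lemma pv_count_q (cs : List Char) : PySem.Chars.count cs ['?'] = cs.count '?' := by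
  unfold PySem.Chars.count
  simpa using pv_count_go_eq cs.length cs 0 le_rfl

lemma pvSubQ_of_no_q (cs : List Char) (n : Int) (h : cs.count '?' = 0) :
    pvSubQ cs n = cs := by
  induction cs generalizing n with
  | nil => simp [pvSubQ]
  | cons c rest ih =>
      have hc : c ≠ '?' := by
        intro hq; subst hq; simp at h
      rw [pvSubQ_cons_ne hc, ih n (by simpa [List.count_cons, hc] using h)]

lemma pvSubQ_append_no_q (p cs : List Char) (n : Int) (h : '?' ∉ p) :
    pvSubQ (p ++ cs) n = p ++ pvSubQ cs n := by
  induction p with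
  | nil => simp
  | cons c rest ih =>
      have hc : c ≠ '?' := fun hq => h (by simp [hq])
      rw [List.cons_append, pvSubQ_cons_ne hc, ih (fun hm => h (by simp [hm]))]
      simp

lemma pv_replaceFirst_key (cs : List Char) :
    ∀ (n : Int), cs.count '?' ≠ 0 →
      pvSubQ (pvReplaceFirstQ cs ('$' :: PySem.Int.toChars n)) (n + 1) = pvSubQ cs n := by
  induction cs with
  | nil => intro n h; simp at h
  | cons c rest ih =>
      intro n h
      by_cases hc : c = '?'
      · subst hc
        show pvSubQ (('$' :: PySem.Int.toChars n) ++ rest) (n + 1) = _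
        rw [pvSubQ_append_no_q _ _ _ (by
          intro hm
          rcases List.mem_cons.mp hm with h' | h'
          · exact absurd h' (by decide)
          · exact pv_q_not_mem_toChars n h'), pvSubQ_cons_q]
      · have hrest : rest.count '?' ≠ 0 := by
          simpa [List.count_cons, hc] using h
        rw [show pvReplaceFirstQ (c :: rest) ('$' :: PySem.Int.toChars n)
              = c :: pvReplaceFirstQ rest ('$' :: PySem.Int.toChars n) by
            simp [pvReplaceFirstQ, hc]]
        rw [pvSubQ_cons_ne hc, pvSubQ_cons_ne hc, ih n hrest]

lemma pv_replaceFirst_count (cs : List Char) :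
    ∀ (n : Int) (k : Nat), cs.count '?' = k + 1 →
      (pvReplaceFirstQ cs ('$' :: PySem.Int.toChars n)).count '?' = k := by
  induction cs with
  | nil => intro n k h; simp at h
  | cons c rest ih =>
      intro n k h
      by_cases hc : c = '?'
      · subst hc
        show (('$' :: PySem.Int.toChars n) ++ rest).count '?' = k
        have hmark : ('$' :: PySem.Int.toChars n).count '?' = 0 := by
          rw [List.count_eq_zero]
          intro hm
          rcases List.mem_cons.mp hm with h' | h'
          · exact absurd h' (by decide)
          · exact pv_q_not_mem_toChars n h'
        rw [List.count_append, hmark]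
        simpa [List.count_cons] using h
      · rw [show pvReplaceFirstQ (c :: rest) ('$' :: PySem.Int.toChars n)
              = c :: pvReplaceFirstQ rest ('$' :: PySem.Int.toChars n) by
            simp [pvReplaceFirstQ, hc]]
        rw [List.count_cons]
        have := ih n k (by simpa [List.count_cons, hc] using h)
        simp [hc, this]

lemma pv_loop_eq (k : Nat) :
    ∀ (cs : List Char) (n : Int), cs.count '?' = k →
      (PySem.List.pyRange n (n + k) 1).foldl
        (fun s index => pvReplaceFirstQ s ('$' :: PySem.Int.toChars index)) cs
      = pvSubQ cs n := by
  induction k with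
  | zero =>
      intro cs n h
      rw [show n + (0 : Nat) = n by simp, PySem.List.pyRange_one_eq_nil le_rfl,
        List.foldl_nil, pvSubQ_of_no_q cs n h]
  | succ k ih =>
      intro cs n h
      have hlt : n < n + (k + 1 : Nat) := by push_cast; omega
      rw [PySem.List.pyRange_one_cons hlt, List.foldl_cons]
      have harith : n + ((k : Nat) + 1 : Nat) = (n + 1) + (k : Nat) := by push_cast; ring
      rw [harith, ih _ (n + 1) (pv_replaceFirst_count cs n k h),
        pv_replaceFirst_key cs n (by omega)]

-- ===== VERDICT (by name: the statement is the Claim_ definition above) =====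
theorem translate_query_py_spec : Claim_equal_translate_query_py := by
  intro query _
  unfold Spec_translate_query_py
  rw [pv_A_eq]
  unfold translate_query_py_alt
  set t := PySem.Str.replace query " COLLATE NOCASE" "" with ht
  show String.ofList (pvSubQ t.toList 1)
      = String.ofList
          ((PySem.List.pyRange 1 ((PySem.Str.count t "?" : Int) + 1) 1).foldl
            (fun s index => pvReplaceFirstQ s ('$' :: PySem.Int.toChars index)) t.toList)
  have hcount : PySem.Str.count t "?" = t.toList.count '?' := by
    rw [PySem.Str.count_eq]
    simpa using pv_count_q t.toList
  rw [hcount,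
    show ((t.toList.count '?' : Int) + 1) = 1 + (t.toList.count '?' : Nat) by ring,
    pv_loop_eq (t.toList.count '?') t.toList 1 rfl]
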